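-- pv_equiv track=rewrite | github.com/KAKUL23FE10CSE00261/Tweet_Emotion_Detection_From_Text | tweet_emotion_detection/app.py | _detect_context_type
-- ===== SOURCE A (Python) =====
-- def _detect_context_type(history_emotions):
--     """
--     Tab 3 ke liye — puri conversation ki emotion timeline se context type detect karo.
--
--     Rules:
--       - 1 message only          → "single"
--       - 3+ messages, shift hua  → "emotion_shift"
--       - 3+ messages, same raha  → "window3"  (multi-turn stable)
--       - 2 messages, same        → "same_emotion"
--       - 2 messages, different   → "emotion_shift"
--     """
--     if not history_emotions or len(history_emotions) <= 1:
--         return "single"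
--
--     emotions = [e["emotion"] for e in history_emotions
--                 if e.get("emotion") and e["emotion"] != "unknown"]
--
--     if len(emotions) < 2:
--         return "single"
--
--     has_shift = any(emotions[i] != emotions[i + 1] for i in range(len(emotions) - 1))
--
--     if len(emotions) >= 3:
--         return "emotion_shift" if has_shift else "window3"
--
--     # Exactly 2
--     return "emotion_shift" if has_shift else "same_emotion"
-- ===== SOURCE B (Python) =====
-- def _detect_context_type(history_emotions):
--     if len(history_emotions) <= 1:
--         return "single"
--     first = None
--     count = 0  # capped at 3: only <2 / ==2 / >=3 matter
--     for e in history_emotions: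
--         v = e.get("emotion")
--         if not v or v == "unknown":
--             continue
--         if first is None:
--             first = v
--         elif v != first:
--             return "emotion_shift"  # a shift guarantees >= 2 valid emotions
--         if count < 3:
--             count += 1
--     if count < 2:
--         return "single"
--     return "window3" if count >= 3 else "same_emotion"
-- ===== Notes on version B (the rewrite author's own statement) =====
-- stated objective: alternative
-- what changed: Replaces A's build-a-filtered-list-then-scan-adjacent-index-pairs with a streaming state machine that keeps only the first valid emotion and a count capped at 3, returning 'emotion_shift' the moment an emotion differs from the first (early exit); no intermediate list is materialised.
import Mathlib
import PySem

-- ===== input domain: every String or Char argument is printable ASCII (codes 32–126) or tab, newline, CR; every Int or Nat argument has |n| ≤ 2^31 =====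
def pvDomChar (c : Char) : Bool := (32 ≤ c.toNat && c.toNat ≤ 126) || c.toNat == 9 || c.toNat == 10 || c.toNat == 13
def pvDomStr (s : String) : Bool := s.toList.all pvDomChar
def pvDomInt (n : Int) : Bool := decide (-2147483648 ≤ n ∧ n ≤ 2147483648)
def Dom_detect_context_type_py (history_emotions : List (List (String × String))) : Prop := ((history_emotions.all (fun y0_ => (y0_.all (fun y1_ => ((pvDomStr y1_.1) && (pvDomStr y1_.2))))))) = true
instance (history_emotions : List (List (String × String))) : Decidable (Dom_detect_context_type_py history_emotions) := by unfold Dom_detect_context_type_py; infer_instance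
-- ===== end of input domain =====

-- B replaces A's filtered list + adjacent-pair scan with a streaming state machine
-- (first valid emotion + count capped at 3) that exits early at the first shift; alternative, not measured faster.

-- ===== PORT A =====
-- literal port of A: filter comprehension, then any() over adjacent index pairs
def detect_context_type_py (history_emotions : List (List (String × String))) : String :=
  if history_emotions.length ≤ 1 then "single"
  else
    let emotions : List String := history_emotions.foldl (fun acc e =>
      match (PySem.Dict.mk e).get? "emotion" with
      | some v => if v ≠ "" ∧ v ≠ "unknown" then acc ++ [v] else acc
      | none => acc) []
    if emotions.length < 2 then "single"
    else
      let has_shift := (PySem.List.pyRange 0 ((emotions.length : Int) - 1) 1).any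
        (fun i => PySem.List.pyGetD emotions i "" != PySem.List.pyGetD emotions (i + 1) "")
      if 3 ≤ emotions.length then
        if has_shift then "emotion_shift" else "window3"
      else
        if has_shift then "emotion_shift" else "same_emotion"

-- ===== PORT B =====
-- B's loop with early return, as the obvious tail recursion over the list
def pvAltGo (first : Option String) (count : Int) : List (List (String × String)) → String
  | [] => if count < 2 then "single" else if 3 ≤ count then "window3" else "same_emotion"
  | e :: rest =>
    match (PySem.Dict.mk e).get? "emotion" with
    | some v =>
      if v ≠ "" ∧ v ≠ "unknown" then
        match first with
        | none => pvAltGo (some v) (if count < 3 then count + 1 else count) rest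
        | some f =>
          if v ≠ f then "emotion_shift"
          else pvAltGo (some f) (if count < 3 then count + 1 else count) rest
      else pvAltGo first count rest
    | none => pvAltGo first count rest

def detect_context_type_py_alt (history_emotions : List (List (String × String))) : String :=
  if history_emotions.length ≤ 1 then "single"
  else pvAltGo none 0 history_emotions

-- ===== PRECONDITION & SPEC =====
def Spec_detect_context_type_py (history_emotions : List (List (String × String))) (out : String) : Prop := out = detect_context_type_py_alt history_emotions
instance (history_emotions : List (List (String × String))) (out : String) : Decidable (Spec_detect_context_type_py history_emotions out) := by unfold Spec_detect_context_type_py; infer_instance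

-- ===== CLAIM (what is proved, stated in full; the proofs are below) =====
def Claim_equal_detect_context_type_py : Prop := ∀ (history_emotions : List (List (String × String))), Dom_detect_context_type_py history_emotions → Spec_detect_context_type_py history_emotions (detect_context_type_py history_emotions)

-- ===== LEMMAS AND PROOFS =====

-- the comprehension's filter condition ('truthy and not "unknown"') and the extracted value
def pvKeep (e : List (String × String)) : Bool :=
  match (PySem.Dict.mk e).get? "emotion" with
  | some v => decide (v ≠ "" ∧ v ≠ "unknown")
  | none => false

def pvEmo (e : List (String × String)) : String :=
  ((PySem.Dict.mk e).get? "emotion").getD ""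

-- B's recursion expressed over the filtered emotion list (proof helper only)
def pvGoL (first : Option String) (count : Int) : List String → String
  | [] => if count < 2 then "single" else if 3 ≤ count then "window3" else "same_emotion"
  | v :: rest =>
    match first with
    | none => pvGoL (some v) (if count < 3 then count + 1 else count) rest
    | some f =>
      if v ≠ f then "emotion_shift"
      else pvGoL (some f) (if count < 3 then count + 1 else count) rest

theorem pv_stepA (acc : List String) (e : List (String × String)) :
    (match (PySem.Dict.mk e).get? "emotion" with
      | some v => if v ≠ "" ∧ v ≠ "unknown" then acc ++ [v] else acc
      | none => acc) = if pvKeep e then acc ++ [pvEmo e] else acc := by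
  unfold pvKeep pvEmo
  cases hg : (PySem.Dict.mk e).get? "emotion" with
  | none => simp
  | some v => simp only [Option.getD_some]; split_ifs with hc <;> simp_all

theorem pv_foldlA (h : List (List (String × String))) :
    h.foldl (fun acc e =>
      match (PySem.Dict.mk e).get? "emotion" with
      | some v => if v ≠ "" ∧ v ≠ "unknown" then acc ++ [v] else acc
      | none => acc) [] = (h.filter pvKeep).map pvEmo := by
  rw [PySem.List.foldl_congr_mem _ _ (fun acc e => if pvKeep e then acc ++ [pvEmo e] else acc) _
    (fun acc x _ => pv_stepA acc x)]
  rw [PySem.List.foldl_append_if pvKeep pvEmo]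
  simp

-- B's traversal of the raw list equals its recursion over the filtered list
theorem pv_altGo_filter (h : List (List (String × String))) (first : Option String) (count : Int) :
    pvAltGo first count h = pvGoL first count ((h.filter pvKeep).map pvEmo) := by
  induction h generalizing first count with
  | nil => rfl
  | cons e rest ih =>
    show (match (PySem.Dict.mk e).get? "emotion" with
      | some v =>
        if v ≠ "" ∧ v ≠ "unknown" then
          match first with
          | none => pvAltGo (some v) (if count < 3 then count + 1 else count) rest
          | some f =>
            if v ≠ f then "emotion_shift"
            else pvAltGo (some f) (if count < 3 then count + 1 else count) rest
        else pvAltGo first count rest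
      | none => pvAltGo first count rest) = _
    cases hg : (PySem.Dict.mk e).get? "emotion" with
    | none =>
      have hk : pvKeep e = false := by simp [pvKeep, hg]
      simp only [List.filter_cons, hk, Bool.false_eq_true, if_false]
      exact ih first count
    | some v =>
      have hemo : pvEmo e = v := by simp [pvEmo, hg]
      dsimp only
      by_cases hc : v ≠ "" ∧ v ≠ "unknown"
      · have hk : pvKeep e = true := by
          simp only [pvKeep, hg, decide_eq_true_eq]; exact hc
        rw [if_pos hc, List.filter_cons, hk]
        simp only [if_true, List.map_cons, hemo]
        cases first with
        | none =>
          simp only [pvGoL]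
          exact ih (some v) (if count < 3 then count + 1 else count)
        | some f =>
          by_cases hvf : v ≠ f
          · simp [pvGoL, hvf]
          · simp only [ne_eq, Decidable.not_not] at hvf
            subst hvf
            simp only [pvGoL]
            rw [if_neg (not_not_intro rfl), if_neg (not_not_intro rfl)]
            exact ih (some v) (if count < 3 then count + 1 else count)
      · have hk : pvKeep e = false := by
          simp only [pvKeep, hg, decide_eq_false_iff_not]; exact hc
        rw [if_neg hc, List.filter_cons, hk]
        simp only [Bool.false_eq_true, if_false]
        exact ih first count

-- once a first emotion f is fixed, pvGoL returns 'emotion_shift' iff some later emotion differs;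
-- otherwise it decides by the capped count
theorem pv_goL_some (rest : List String) (f : String) (c : Int) (h1 : 1 ≤ c) (h3 : c ≤ 3) :
    pvGoL (some f) c rest =
      if rest.any (fun y => y != f) then "emotion_shift"
      else if min 3 (c + rest.length) < 2 then "single"
      else if (3 : Int) ≤ min 3 (c + rest.length) then "window3" else "same_emotion" := by
  induction rest generalizing c with
  | nil =>
    have hm : min 3 (c + ((List.length ([] : List String)) : Int)) = c := by
      simp only [List.length_nil, Nat.cast_zero, add_zero]; omega
    simp [pvGoL, hm]
  | cons y ys ih =>
    by_cases hy : y ≠ f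
    · simp [pvGoL, hy]
    · simp only [ne_eq, Decidable.not_not] at hy
      subst hy
      have hrec := ih (if c < 3 then c + 1 else c) (by split_ifs <;> omega) (by split_ifs <;> omega)
      simp only [pvGoL]
      rw [if_neg (not_not_intro rfl), hrec]
      have hmin : min 3 ((if c < 3 then c + 1 else c) + (ys.length : Int))
          = min 3 (c + ((y :: ys).length : Int)) := by
        simp only [List.length_cons]
        push_cast
        split_ifs <;> omega
      rw [hmin]
      simp only [List.any_cons, bne_self_eq_false, Bool.false_or]

-- the adjacent-index scan finds no difference iff all elements are pairwise equal
theorem pv_adj_false_iff (l : List String) :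
    ((List.range (l.length - 1)).any
      (fun k => l.getD k "" != l.getD (k + 1) "") = false)
    ↔ ∀ a ∈ l, ∀ b ∈ l, a = b := by
  rw [List.any_eq_false]
  constructor
  · intro hadj
    have hstep : ∀ k, k < l.length - 1 → l.getD k "" = l.getD (k + 1) "" := by
      intro k hk
      have := hadj k (List.mem_range.mpr hk)
      simpa [bne] using this
    have hzero : ∀ i, i < l.length → l.getD i "" = l.getD 0 "" := by
      intro i
      induction i with
      | zero => intro _; rfl
      | succ j ih =>
        intro hj
        have hj' : j < l.length - 1 := by omega
        rw [← hstep j hj']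
        exact ih (by omega)
    intro a ha b hb
    obtain ⟨i, hi, rfl⟩ := List.mem_iff_getElem.mp ha
    obtain ⟨j, hj, rfl⟩ := List.mem_iff_getElem.mp hb
    rw [← List.getD_eq_getElem l "" hi, ← List.getD_eq_getElem l "" hj,
      hzero i hi, hzero j hj]
  · intro hall k hk
    have hk' : k < l.length - 1 := List.mem_range.mp hk
    have h1 : k < l.length := by omega
    have h2 : k + 1 < l.length := by omega
    have := hall (l.getD k "") (by rw [List.getD_eq_getElem l "" h1]; exact l.getElem_mem h1)
      (l.getD (k + 1) "") (by rw [List.getD_eq_getElem l "" h2]; exact l.getElem_mem h2)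
    simp only [bne_iff_ne, ne_eq, Decidable.not_not]
    exact this

-- A's pyRange adjacent scan, rewritten over Nat range
theorem pv_shift_natrange (l : List String) :
    ((PySem.List.pyRange 0 ((l.length : Int) - 1) 1).any
      (fun i => PySem.List.pyGetD l i "" != PySem.List.pyGetD l (i + 1) ""))
    = (List.range (l.length - 1)).any (fun k => l.getD k "" != l.getD (k + 1) "") := by
  have hrange : ((l.length : Int) - 1 - 0).toNat = l.length - 1 := by omega
  rw [PySem.List.pyRange_one, List.any_map]
  have hfun : ∀ k ∈ List.range ((l.length : Int) - 1 - 0).toNat,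
      ((fun i => PySem.List.pyGetD l i "" != PySem.List.pyGetD l (i + 1) "") ∘
        (fun (k : Nat) => (0 : Int) + k)) k
      = (fun k => l.getD k "" != l.getD (k + 1) "") k := by
    intro k _
    simp only [Function.comp, zero_add]
    have h1 : ((k : Int) + 1) = ((k + 1 : Nat) : Int) := by push_cast; ring
    rw [h1, PySem.List.pyGetD_natCast, PySem.List.pyGetD_natCast]
  rw [PySem.List.any_congr_mem hfun, hrange]

-- ===== VERDICT (by name: the statement is the Claim_ definition above) =====
theorem detect_context_type_py_spec : Claim_equal_detect_context_type_py := by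
  intro h _
  unfold Spec_detect_context_type_py detect_context_type_py detect_context_type_py_alt
  by_cases h1 : h.length ≤ 1
  · simp [h1]
  · simp only [h1, if_false]
    rw [pv_foldlA, pv_altGo_filter]
    set l := (h.filter pvKeep).map pvEmo with hl
    cases hcase : l with
    | nil => simp [pvGoL]
    | cons x rest =>
      have hgo := pv_goL_some rest x 1 (by omega) (by omega)
      simp only [pvGoL, show (if (0 : Int) < 3 then (0 : Int) + 1 else 0) = 1 from by norm_num]
      rw [hgo, pv_shift_natrange (x :: rest)]
      by_cases hshift : (x :: rest).any (fun y => y != x) = true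
      · -- a later emotion differs: adjacent scan must find a difference, and length ≥ 2
        have hne : ∃ b ∈ (x :: rest), b ≠ x := by
          obtain ⟨b, hb, hbx⟩ := List.any_eq_true.mp hshift
          exact ⟨b, hb, by simpa using hbx⟩
        have hadj : ((List.range ((x :: rest).length - 1)).any
            (fun k => (x :: rest).getD k "" != (x :: rest).getD (k + 1) "")) = true := by
          by_contra hfalse
          have hf : ((List.range ((x :: rest).length - 1)).any
              (fun k => (x :: rest).getD k "" != (x :: rest).getD (k + 1) "")) = false := by
            cases hb : ((List.range ((x :: rest).length - 1)).any
              (fun k => (x :: rest).getD k "" != (x :: rest).getD (k + 1) "")) with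
            | false => rfl
            | true => exact absurd hb hfalse
          obtain ⟨b, hb, hbx⟩ := hne
          exact hbx (((pv_adj_false_iff (x :: rest)).mp hf) b hb x List.mem_cons_self)
        have hrestsh : rest.any (fun y => y != x) = true := by
          simpa using hshift
        have hlen2 : ¬ ((x :: rest).length < 2) := by
          cases rest with
          | nil => simp at hrestsh
          | cons _ _ => simp
        simp only [hlen2, if_false, hadj, hrestsh, if_true]
        by_cases h3 : 3 ≤ (x :: rest).length <;> simp [h3]
      · -- all equal: no adjacent difference, decide by length
        have hrestsh : rest.any (fun y => y != x) = false := by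
          cases hb : rest.any (fun y => y != x) with
          | false => rfl
          | true => exact absurd (by simpa using hb) (by simpa using hshift)
        have hall : ∀ a ∈ (x :: rest), ∀ b ∈ (x :: rest), a = b := by
          have hx : ∀ y ∈ rest, y = x := by
            intro y hy
            have := List.any_eq_false.mp hrestsh y hy
            simpa using this
          intro a ha b hb
          rcases List.mem_cons.mp ha with rfl | ha' <;>
            rcases List.mem_cons.mp hb with rfl | hb'
          · rfl
          · exact (hx b hb').symm
          · exact hx a ha'
          · rw [hx a ha', hx b hb']
        have hadj : ((List.range ((x :: rest).length - 1)).any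
            (fun k => (x :: rest).getD k "" != (x :: rest).getD (k + 1) "")) = false :=
          (pv_adj_false_iff (x :: rest)).mpr hall
        simp only [hadj, hrestsh, if_false, Bool.false_eq_true]
        have hlen : (x :: rest).length = rest.length + 1 := rfl
        by_cases hl2 : (x :: rest).length < 2
        · have hre : rest = [] := by
            cases rest with
            | nil => rfl
            | cons _ _ => simp at hl2
          subst hre
          norm_num [hl2]
        · have hr1 : 1 ≤ rest.length := by rw [hlen] at hl2; omega
          have hmin2 : ¬ (min 3 (1 + (rest.length : Int)) < 2) := by omega
          simp only [hl2, if_false, hmin2]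
          by_cases h3 : 3 ≤ (x :: rest).length
          · have h3' : (3 : Int) ≤ min 3 (1 + (rest.length : Int)) := by
              rw [hlen] at h3; omega
            simp only [h3', if_true]
            rw [if_pos h3]
          · have h3' : ¬ ((3 : Int) ≤ min 3 (1 + (rest.length : Int))) := by
              rw [hlen] at h3; omega
            simp only [h3', if_false]
            rw [if_neg h3]
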